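-- pv_equiv track=rewrite | github.com/dattt19uit/OpenABC | datagen/experimental/generate_nl_logic_dataset.py | _decoder_expr
-- ===== SOURCE A (Python) =====
-- from typing import Dict, List, Tuple, Optional
--
-- def _decoder_expr(inputs: List[str]) -> List[str]:
--     width = len(inputs)
--     outputs = []
--     for i in range(2 ** width):
--         terms = []
--         for bit in range(width):
--             if (i >> bit) & 1:
--                 terms.append(inputs[bit])
--             else:
--                 terms.append(f"~{inputs[bit]}")
--         outputs.append(" & ".join(terms))
--     return outputs
-- ===== SOURCE B (Python) =====
-- def _decoder_expr(inputs):
--     # Build minterm term-lists incrementally by doubling (shared prefixes),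
--     # negated block first so bit 0 (the first input) toggles fastest.
--     cur = [[]]
--     for x in inputs:
--         neg = "~" + x
--         cur = [t + [neg] for t in cur] + [t + [x] for t in cur]
--     return [" & ".join(t) for t in cur]
-- ===== Notes on version B (the rewrite author's own statement) =====
-- stated objective: alternative
-- what changed: Replaces the per-index bit-decoding double loop (for each i in range(2**n), rebuild all n literals from i's bits) by incremental doubling: one pass over the inputs that maps the current term-list to its negated and positive extensions, then a final join.
import Mathlib
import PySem

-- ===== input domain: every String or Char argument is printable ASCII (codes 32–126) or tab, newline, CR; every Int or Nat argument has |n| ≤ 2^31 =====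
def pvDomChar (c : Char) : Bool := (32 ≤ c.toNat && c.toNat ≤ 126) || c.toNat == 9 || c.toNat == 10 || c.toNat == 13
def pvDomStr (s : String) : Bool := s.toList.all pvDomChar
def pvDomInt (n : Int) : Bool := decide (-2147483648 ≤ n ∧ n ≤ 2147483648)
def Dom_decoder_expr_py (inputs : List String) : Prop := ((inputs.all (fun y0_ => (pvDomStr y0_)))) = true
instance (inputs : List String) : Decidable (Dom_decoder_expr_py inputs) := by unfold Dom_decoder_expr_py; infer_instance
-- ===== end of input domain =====

-- B builds the minterms by incremental doubling over the inputs instead of A's per-index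
-- bit decoding; same output, a different (not faster) decomposition.

-- ===== PORT A =====
-- Literal port of A: for each i in range(2**width), rebuild the term list from i's bits.
-- Loop indices i and bit are nonnegative, so the Nat shift/and via .toNat are exact.
def decoder_expr_py (inputs : List String) : List String :=
  let width := inputs.length
  (PySem.List.pyRange 0 ((2 ^ width : Nat) : Int) 1).foldl (fun outputs i =>
    let terms := (PySem.List.pyRange 0 (width : Int) 1).foldl (fun terms bit =>
      if (i.toNat >>> bit.toNat) &&& 1 ≠ 0 then
        terms ++ [PySem.List.pyGetD inputs bit ""]
      else
        terms ++ ["~" ++ PySem.List.pyGetD inputs bit ""]) []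
    outputs ++ [PySem.Str.join " & " terms]) []

-- ===== PORT B =====
-- Literal port of B: cur starts as [[]]; each input doubles it (negated block first).
def decoder_expr_py_alt (inputs : List String) : List String :=
  let cur := inputs.foldl (fun cur x =>
    cur.map (fun t => t ++ ["~" ++ x]) ++ cur.map (fun t => t ++ [x])) [([] : List String)]
  cur.map (fun t => PySem.Str.join " & " t)

-- ===== PRECONDITION & SPEC =====
def Spec_decoder_expr_py (inputs : List String) (out : List String) : Prop := out = decoder_expr_py_alt inputs
instance (inputs : List String) (out : List String) : Decidable (Spec_decoder_expr_py inputs out) := by unfold Spec_decoder_expr_py; infer_instance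

-- ===== CLAIM (what is proved, stated in full; the proofs are below) =====
def Claim_equal_decoder_expr_py : Prop := ∀ (inputs : List String), Dom_decoder_expr_py inputs → Spec_decoder_expr_py inputs (decoder_expr_py inputs)

-- ===== LEMMAS AND PROOFS =====

-- B's accumulated term-list (cur after the fold, before joining).
def pvM (xs : List String) : List (List String) :=
  xs.foldl (fun cur x =>
    cur.map (fun t => t ++ ["~" ++ x]) ++ cur.map (fun t => t ++ [x])) [([] : List String)]

-- A's term list for index i, as a map over the bit positions.
def pvTm (xs : List String) (i : Nat) : List String :=
  (List.range xs.length).map (fun bit =>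
    if (i >>> bit) &&& 1 ≠ 0 then xs.getD bit "" else "~" ++ xs.getD bit "")

theorem pvFoldShift (r : List String) (acc : List (List String)) :
    r.foldl (fun cur x =>
      cur.map (fun t => t ++ ["~" ++ x]) ++ cur.map (fun t => t ++ [x])) acc
    = (pvM r).flatMap (fun s => acc.map (fun t => t ++ s)) := by
  induction r generalizing acc with
  | nil => simp [pvM]
  | cons x r ih =>
    have hM : pvM (x :: r)
        = (pvM r).flatMap (fun s =>
            ([["~" ++ x], [x]] : List (List String)).map (fun t => t ++ s)) := by
      simp only [pvM, List.foldl_cons]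
      rw [ih]
      simp [pvM]
    rw [List.foldl_cons, ih, hM, List.flatMap_assoc]
    apply List.flatMap_congr
    intro s _
    simp [Function.comp_def, List.append_assoc]

theorem pvM_cons (x : String) (r : List String) :
    pvM (x :: r) = (pvM r).flatMap (fun s => [("~" ++ x) :: s, x :: s]) := by
  simp only [pvM, List.foldl_cons]
  rw [pvFoldShift]
  simp [pvM]

theorem pvRangeTwoMul (n : Nat) :
    List.range (2 * n) = (List.range n).flatMap (fun j => [2 * j, 2 * j + 1]) := by
  induction n with
  | zero => simp
  | succ n ih =>
    have h : 2 * (n + 1) = (2 * n) + 1 + 1 := by omega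
    rw [h, List.range_succ, List.range_succ, ih, List.range_succ]
    simp

theorem pvTm_cons (x : String) (r : List String) (i : Nat) :
    pvTm (x :: r) i
      = (if i &&& 1 ≠ 0 then x else "~" ++ x) :: pvTm r (i >>> 1) := by
  have hsh : ∀ b : Nat, i >>> (b + 1) = i >>> 1 >>> b := by
    intro b; rw [Nat.add_comm, Nat.shiftRight_add]
  simp only [pvTm, List.length_cons, List.range_succ_eq_map, List.map_cons, List.map_map]
  refine congrArg₂ List.cons (by rw [Nat.shiftRight_zero]; rfl) ?_
  apply List.map_congr_left
  intro b _
  simp only [Function.comp_apply, Nat.succ_eq_add_one, List.getD_cons_succ]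
  rw [hsh]

theorem pvMain (xs : List String) :
    (List.range (2 ^ xs.length)).map (pvTm xs) = pvM xs := by
  induction xs with
  | nil => simp [pvTm, pvM]
  | cons x r ih =>
    have hp : 2 ^ (x :: r).length = 2 * 2 ^ r.length := by
      simp [List.length_cons, pow_succ]; ring
    rw [hp, pvRangeTwoMul, List.map_flatMap, pvM_cons, ← ih, List.flatMap_map]
    apply List.flatMap_congr
    intro j _
    have h1 : (2 * j) &&& 1 = 0 := by rw [Nat.and_one_is_mod]; omega
    have h2 : (2 * j + 1) &&& 1 = 1 := by rw [Nat.and_one_is_mod]; omega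
    have h3 : (2 * j) >>> 1 = j := by rw [Nat.shiftRight_one]; omega
    have h4 : (2 * j + 1) >>> 1 = j := by rw [Nat.shiftRight_one]; omega
    simp [pvTm_cons, h1, h2, h3, h4]

-- ===== VERDICT (by name: the statement is the Claim_ definition above) =====
theorem decoder_expr_py_spec : Claim_equal_decoder_expr_py := by
  intro inputs _
  unfold Spec_decoder_expr_py
  have hb : decoder_expr_py_alt inputs
      = (pvM inputs).map (fun t => PySem.Str.join " & " t) := rfl
  have hsplit : ∀ (t : List String) (c : Prop) [Decidable c] (a b : String),
      (if c then t ++ [a] else t ++ [b]) = t ++ [if c then a else b] := by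
    intro t c _ a b; split_ifs <;> rfl
  rw [hb, ← pvMain, List.map_map]
  unfold decoder_expr_py
  simp only [hsplit, PySem.List.foldl_append_singleton_eq_map,
    PySem.List.pyRange_zero_natCast, List.map_map, List.nil_append]
  apply List.map_congr_left
  intro k _
  simp [Function.comp_def, pvTm, PySem.List.pyGetD_natCast, Int.toNat_natCast]
  rfl
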